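-- pv_equiv track=rewrite | github.com/FNA2003/grupo1-tp1-v1 | lexer/AFDs.py | afd_sum_operation
-- ===== SOURCE A (Python) =====
-- def afd_sum_operation(cadena):
--     """El estado aceptado es 1"""
--     estados_sin_trampa = [0, 1]
--     estados_aceptados = [1]
--     estados_no_aceptados = [0]
--     estado_trampa = 't'
--     estado = 0
--     caracteres = ['+', '-']
--     delta = {
--     0: {'+': 1, '-': 1},
--     1: {'+': 't', '-': 't'},
--     't': {'+': 't', '-': 't'}
--     }
--
--     for caracter in cadena:
--         if (estado in estados_sin_trampa) and (caracter in caracteres):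
--             estado = delta[estado][caracter]
--         elif (estado == 't') or not(caracter in caracteres):
--             estado = 't'
--             break
--
--     if estado in estados_aceptados:
--         estado_final = 'aceptado'
--     elif estado in estados_no_aceptados:
--         estado_final = 'no aceptado'
--     elif estado == estado_trampa:
--         estado_final = 'trampa'
--
--     return estado_final
-- ===== SOURCE B (Python) =====
-- def afd_sum_operation(cadena):
--     """El estado aceptado es 1"""
--     chars = list(cadena)
--     if len(chars) == 0:
--         return 'no aceptado'
--     if len(chars) == 1 and chars[0] in ('+', '-'):
--         return 'aceptado'
--     return 'trampa'
-- ===== Notes on version B (the rewrite author's own statement) =====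
-- stated objective: simpler
-- what changed: Replaced the delta-table DFA simulation loop with a direct closed-form classification: empty -> 'no aceptado', a single '+'/'-' -> 'aceptado', anything else -> 'trampa'.
import Mathlib
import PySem

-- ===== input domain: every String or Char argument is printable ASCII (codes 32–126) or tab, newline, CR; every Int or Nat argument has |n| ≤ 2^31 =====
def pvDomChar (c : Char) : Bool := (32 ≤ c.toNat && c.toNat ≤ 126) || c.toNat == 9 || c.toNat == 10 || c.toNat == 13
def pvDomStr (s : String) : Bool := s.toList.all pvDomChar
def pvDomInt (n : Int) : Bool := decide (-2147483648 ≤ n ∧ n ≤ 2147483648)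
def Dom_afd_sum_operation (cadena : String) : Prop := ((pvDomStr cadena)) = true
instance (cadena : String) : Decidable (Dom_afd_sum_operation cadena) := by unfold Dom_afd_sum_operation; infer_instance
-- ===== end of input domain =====

-- B replaces A's delta-table DFA loop with a closed-form length/membership classification (objective: simpler).

-- ===== PORT A =====
-- DFA state: 0, 1, or the trap state 't'
inductive AfdSt | s0 | s1 | st
deriving DecidableEq, Repr

-- the delta table of A (only consulted for estado ∈ {0,1} and caracter ∈ {'+','-'})
def afdDelta (e : AfdSt) : AfdSt :=
  match e with
  | .s0 => .s1
  | .s1 => .st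
  | .st => .st

-- A's for-loop with its break: processes characters, updating estado
def afdLoop (cs : List Char) (estado : AfdSt) : AfdSt :=
  match cs with
  | [] => estado
  | c :: rest =>
    if (estado = .s0 ∨ estado = .s1) ∧ (c = '+' ∨ c = '-') then
      afdLoop rest (afdDelta estado)
    else if estado = .st ∨ ¬ (c = '+' ∨ c = '-') then
      .st   -- estado = 't'; break
    else
      afdLoop rest estado

def afd_sum_operation (cadena : String) : String :=
  let estado := afdLoop cadena.toList .s0
  if estado = .s1 then "aceptado"
  else if estado = .s0 then "no aceptado"
  else "trampa"

-- ===== PORT B =====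
def afd_sum_operation_alt (cadena : String) : String :=
  let chars := cadena.toList
  if chars.length = 0 then "no aceptado"
  else if chars.length = 1 ∧ (chars.headI = '+' ∨ chars.headI = '-') then "aceptado"
  else "trampa"

-- ===== PRECONDITION & SPEC =====
def Spec_afd_sum_operation (cadena : String) (out : String) : Prop := out = afd_sum_operation_alt cadena
instance (cadena : String) (out : String) : Decidable (Spec_afd_sum_operation cadena out) := by unfold Spec_afd_sum_operation; infer_instance

-- ===== CLAIM (what is proved, stated in full; the proofs are below) =====
def Claim_equal_afd_sum_operation : Prop := ∀ (cadena : String), Dom_afd_sum_operation cadena → Spec_afd_sum_operation cadena (afd_sum_operation cadena)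

-- ===== LEMMAS AND PROOFS =====

-- once in the trap state, the loop stays there
theorem afdLoop_st (cs : List Char) : afdLoop cs .st = .st := by
  induction cs with
  | nil => rfl
  | cons c rest ih => simp [afdLoop]

-- ===== VERDICT (by name: the statement is the Claim_ definition above) =====
theorem afd_sum_operation_spec : Claim_equal_afd_sum_operation := by
  intro cadena _
  unfold Spec_afd_sum_operation afd_sum_operation afd_sum_operation_alt
  cases hl : cadena.toList with
  | nil => simp [afdLoop]
  | cons c rest =>
    by_cases hc : c = '+' ∨ c = '-'
    · cases rest with
      | nil =>
        rcases hc with rfl | rfl <;> simp [afdLoop, afdDelta]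
      | cons d rest' =>
        by_cases hd : d = '+' ∨ d = '-'
        · simp [afdLoop, hc, afdDelta, hd, afdLoop_st]
        · simp [afdLoop, hc, afdDelta, hd]
    · simp [afdLoop, hc, List.headI]
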